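-- pv_equiv track=rewrite | github.com/seojineer/linaro-license-protection | testing/doctest_production_browser.py | find_link_with_condition
-- ===== SOURCE A (Python) =====
-- def find_link_with_condition(links, condition):
--     """Finds a link which satisfies the condition.
--
--     Condition is actually to contain the string from the list.
--     Build files (which end in .tar.bz2) have the priority.
--     """
--     for link in links:
--         if condition in link and link[-7:] == "tar.bz2":
--             return link
--     for link in links:
--         if condition in link:
--             return link
--     return None
-- ===== SOURCE B (Python) =====
-- def find_link_with_condition(links, condition):
--     """Single pass: return the first tar.bz2 match immediately; otherwise
--     remember the first plain match and return it after the scan."""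
--     first_plain = None
--     for link in links:
--         if condition in link:
--             if link[-7:] == "tar.bz2":
--                 return link
--             if first_plain is None:
--                 first_plain = link
--     return first_plain
-- ===== Notes on version B (the rewrite author's own statement) =====
-- stated objective: simpler
-- what changed: Replaces A's two sequential scans of the list with one pass that returns a tar.bz2 match immediately and carries the first plain match in a variable, returned after the scan.
import Mathlib
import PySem

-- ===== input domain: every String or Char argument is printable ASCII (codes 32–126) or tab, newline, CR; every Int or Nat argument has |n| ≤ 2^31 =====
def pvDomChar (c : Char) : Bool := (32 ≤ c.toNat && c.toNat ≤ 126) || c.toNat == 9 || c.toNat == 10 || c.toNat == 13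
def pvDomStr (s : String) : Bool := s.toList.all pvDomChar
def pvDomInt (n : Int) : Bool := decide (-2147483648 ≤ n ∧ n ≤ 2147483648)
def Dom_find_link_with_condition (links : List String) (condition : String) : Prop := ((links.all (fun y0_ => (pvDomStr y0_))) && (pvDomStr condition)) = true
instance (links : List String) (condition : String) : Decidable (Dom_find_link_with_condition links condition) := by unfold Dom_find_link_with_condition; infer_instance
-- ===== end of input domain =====

-- B collapses A's two sequential scans into one pass carrying the first plain match; objective: simpler.

-- ===== PORT A =====
-- first loop of A: first link containing condition AND ending in "tar.bz2"
def pvALoop1 (links : List String) (condition : String) : Option String :=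
  match links with
  | [] => none
  | link :: rest =>
      if PySem.Str.isIn condition link && (PySem.Str.slice link (some (-7)) none == "tar.bz2") then
        some link
      else pvALoop1 rest condition

-- second loop of A: first link containing condition
def pvALoop2 (links : List String) (condition : String) : Option String :=
  match links with
  | [] => none
  | link :: rest =>
      if PySem.Str.isIn condition link then some link else pvALoop2 rest condition

def find_link_with_condition (links : List String) (condition : String) : Option String :=
  match pvALoop1 links condition with
  | some link => some link
  | none => pvALoop2 links condition

-- ===== PORT B =====
-- B's single loop, carrying first_plain
def pvBLoop (links : List String) (condition : String) (first_plain : Option String) : Option String :=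
  match links with
  | [] => first_plain
  | link :: rest =>
      if PySem.Str.isIn condition link then
        if PySem.Str.slice link (some (-7)) none == "tar.bz2" then some link
        else pvBLoop rest condition (if first_plain = none then some link else first_plain)
      else pvBLoop rest condition first_plain

def find_link_with_condition_alt (links : List String) (condition : String) : Option String :=
  pvBLoop links condition none

-- ===== PRECONDITION & SPEC =====
def Spec_find_link_with_condition (links : List String) (condition : String) (out : Option String) : Prop := out = find_link_with_condition_alt links condition
instance (links : List String) (condition : String) (out : Option String) : Decidable (Spec_find_link_with_condition links condition out) := by unfold Spec_find_link_with_condition; infer_instance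

-- ===== CLAIM (what is proved, stated in full; the proofs are below) =====
def Claim_equal_find_link_with_condition : Prop := ∀ (links : List String) (condition : String), Dom_find_link_with_condition links condition → Spec_find_link_with_condition links condition (find_link_with_condition links condition)

-- ===== LEMMAS AND PROOFS =====
-- invariant of B's loop: it equals A's loop1 result, else the carried first_plain, else A's loop2 result
theorem pvBLoop_eq (links : List String) (condition : String) (first_plain : Option String) :
    pvBLoop links condition first_plain =
      match pvALoop1 links condition, first_plain with
      | some x, _ => some x
      | none, some y => some y
      | none, none => pvALoop2 links condition := by
  induction links generalizing first_plain with
  | nil => cases first_plain <;> simp [pvBLoop, pvALoop1, pvALoop2]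
  | cons link rest ih =>
      by_cases h1 : PySem.Chars.isIn condition.toList link.toList = true
      · by_cases h2 : PySem.Str.slice link (some (-7)) none = "tar.bz2"
        · simp [pvBLoop, pvALoop1, h1, h2]
        · cases first_plain <;>
            simp [pvBLoop, pvALoop1, pvALoop2, h1, h2, ih] <;>
            cases pvALoop1 rest condition <;> rfl
      · rw [Bool.not_eq_true] at h1
        simp [pvBLoop, pvALoop1, pvALoop2, h1, ih]

-- ===== VERDICT (by name: the statement is the Claim_ definition above) =====
theorem find_link_with_condition_spec : Claim_equal_find_link_with_condition := by
  intro links condition _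
  unfold Spec_find_link_with_condition find_link_with_condition find_link_with_condition_alt
  rw [pvBLoop_eq]
  cases pvALoop1 links condition <;> rfl
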